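-- pv_equiv track=rewrite | github.com/genomicepidemiology/CGPhylo | cgphylo/cgphylo_pipeline.py | recreate_alignment
-- ===== SOURCE A (Python) =====
-- def recreate_alignment(seq, gap_string):
--     if not gap_string:
--         return seq
--
--     gap_positions = list(map(int, gap_string.split(',')))
--     # Sort gap positions to ensure we insert them in the correct order
--     gap_positions.sort()
--
--     result = []
--     added_gaps = 0
--
--     for i, char in enumerate(seq):
--         # Adjust the position for gaps already added
--         while added_gaps < len(gap_positions) and i + added_gaps == gap_positions[added_gaps]:
--             result.append('-')
--             added_gaps += 1
--         result.append(char)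
--
--     # Append remaining gaps if any (in case they are at the end of the sequence)
--     result.extend('-' * (len(gap_positions) - added_gaps))
--
--     return ''.join(result)
-- ===== SOURCE B (Python) =====
-- def recreate_alignment(seq, gap_string):
--     if not gap_string:
--         return seq
--
--     positions = sorted(map(int, gap_string.split(',')))
--
--     out = []
--     seq_idx = 0
--     o = 0          # output length emitted so far (chars + gaps)
--     emitted = 0
--     for p in positions:
--         need = p - o
--         if need < 0 or seq_idx + need > len(seq):
--             break
--         out.append(seq[seq_idx:seq_idx + need])
--         out.append('-')
--         seq_idx += need
--         o += need + 1
--         emitted += 1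
--     out.append(seq[seq_idx:])
--     out.append('-' * (len(positions) - emitted))
--     return ''.join(out)
-- ===== Notes on version B (the rewrite author's own statement) =====
-- stated objective: alternative
-- what changed: B iterates over the sorted gap positions, appending the whole slice of seq between consecutive gaps (with a break once a position can no longer be placed), instead of A's per-character loop with an inner while over pending gap positions.
import Mathlib
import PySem

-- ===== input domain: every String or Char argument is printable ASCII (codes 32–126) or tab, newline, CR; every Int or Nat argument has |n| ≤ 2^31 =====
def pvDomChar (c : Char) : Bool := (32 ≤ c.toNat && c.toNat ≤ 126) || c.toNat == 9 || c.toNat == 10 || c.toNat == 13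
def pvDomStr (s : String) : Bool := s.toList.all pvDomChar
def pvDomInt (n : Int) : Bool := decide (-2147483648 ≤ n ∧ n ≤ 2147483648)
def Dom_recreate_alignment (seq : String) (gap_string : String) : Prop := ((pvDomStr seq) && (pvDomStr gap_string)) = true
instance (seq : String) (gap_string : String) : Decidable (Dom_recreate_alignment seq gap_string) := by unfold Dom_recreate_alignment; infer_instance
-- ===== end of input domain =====

-- B inserts gaps by iterating over the sorted gap positions (emitting whole slices of seq
-- between consecutive gaps) instead of A's per-character loop with an inner while;
-- objective: alternative decomposition, same asymptotic cost.

-- ===== PORT A =====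
-- shared by both ports: gap_positions = sorted(map(int, gap_string.split(',')))
-- (split? with sep "," is always some; int() raising ValueError is excluded by Pre_, getD 0 is never read there)
def pvGapPositions (gap_string : String) : List Int :=
  PySem.List.sorted (((PySem.Str.split? gap_string ",").getD []).map fun t => (PySem.Int.ofStr? t).getD 0) (fun x => x) false

-- the inner 'while added_gaps < len(gap_positions) and i + added_gaps == gap_positions[added_gaps]'
def pvAGaps (gp : List Int) (i : Nat) (res : List Char) (ag : Nat) : List Char × Nat :=
  if h : ag < gp.length ∧ ((i : Int) + (ag : Int) = gp.getD ag 0) then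
    pvAGaps gp i (res ++ ['-']) (ag + 1)
  else (res, ag)
termination_by gp.length - ag
decreasing_by omega

-- 'for i, char in enumerate(seq): …'  (result accumulated as List Char; each appended piece is one char)
def pvALoop (gp : List Int) (cs : List Char) (i : Nat) (res : List Char) (ag : Nat) : List Char × Nat :=
  match cs with
  | [] => (res, ag)
  | c :: rest =>
    let ra := pvAGaps gp i res ag
    pvALoop gp rest (i + 1) (ra.1 ++ [c]) ra.2

def recreate_alignment (seq : String) (gap_string : String) : String :=
  if gap_string = "" then seq
  else
    let gp := pvGapPositions gap_string
    let ra := pvALoop gp seq.toList 0 [] 0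
    -- ''.join(result) + the trailing '-' * (len(gap_positions) - added_gaps)
    String.ofList (ra.1 ++ List.replicate (gp.length - ra.2) '-')

-- ===== PORT B =====
-- 'for p in positions: …' with break; state (out, seq_idx, o, emitted); o = output length so far.
-- seq[seq_idx:seq_idx+need] with 0 ≤ seq_idx, 0 ≤ need is exactly (drop seq_idx).take need (PySem.List.slice_natCast_add).
def pvBLoop (cs : List Char) (ps : List Int) (out : List Char) (si o emitted : Nat) : List Char × Nat × Nat :=
  match ps with
  | [] => (out, si, emitted)
  | p :: rest =>
    let need : Int := p - (o : Int)
    if need < 0 ∨ (si : Int) + need > (cs.length : Int) then (out, si, emitted)  -- break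
    else pvBLoop cs rest (out ++ ((cs.drop si).take need.toNat ++ ['-'])) (si + need.toNat) (o + need.toNat + 1) (emitted + 1)

def recreate_alignment_alt (seq : String) (gap_string : String) : String :=
  if gap_string = "" then seq
  else
    let gp := pvGapPositions gap_string
    let rb := pvBLoop seq.toList gp [] 0 0 0
    -- ''.join(out) after appending seq[seq_idx:] and '-' * (len(positions) - emitted)
    String.ofList (rb.1 ++ seq.toList.drop rb.2.1 ++ List.replicate (gp.length - rb.2.2) '-')

-- ===== PRECONDITION & SPEC =====
-- Pre_ excludes only inputs on which A raises ValueError: a non-empty gap_string with a comma-separated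
-- token that int() cannot parse.
def Pre_recreate_alignment (seq : String) (gap_string : String) : Prop :=
  gap_string = "" ∨ (((PySem.Str.split? gap_string ",").getD []).all fun t => (PySem.Int.ofStr? t).isSome) = true
instance (seq : String) (gap_string : String) : Decidable (Pre_recreate_alignment seq gap_string) := by
  unfold Pre_recreate_alignment; infer_instance

def pvWitness_recreate_alignment : String × String := ("ACGT", "1,3")

def Spec_recreate_alignment (seq : String) (gap_string : String) (out : String) : Prop := out = recreate_alignment_alt seq gap_string
instance (seq : String) (gap_string : String) (out : String) : Decidable (Spec_recreate_alignment seq gap_string out) := by unfold Spec_recreate_alignment; infer_instance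

-- ===== CLAIM (what is proved, stated in full; the proofs are below) =====
def Claim_equal_recreate_alignment : Prop := ∀ (seq : String) (gap_string : String), Dom_recreate_alignment seq gap_string → Pre_recreate_alignment seq gap_string → Spec_recreate_alignment seq gap_string (recreate_alignment seq gap_string)

-- ===== LEMMAS AND PROOFS =====

-- unfolding equations for the while loop
theorem pvAGaps_fire (gp : List Int) (i : Nat) (res : List Char) (ag : Nat)
    (h : ag < gp.length ∧ ((i : Int) + (ag : Int) = gp.getD ag 0)) :
    pvAGaps gp i res ag = pvAGaps gp i (res ++ ['-']) (ag + 1) := by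
  rw [pvAGaps]; rw [dif_pos h]

theorem pvAGaps_stop (gp : List Int) (i : Nat) (res : List Char) (ag : Nat)
    (h : ¬ (ag < gp.length ∧ ((i : Int) + (ag : Int) = gp.getD ag 0))) :
    pvAGaps gp i res ag = (res, ag) := by
  rw [pvAGaps]; rw [dif_neg h]

-- the main simulation: starting at character index si with k gaps already emitted
-- (A's state: remaining chars cs.drop si, added_gaps = k; B's state: seq_idx = si, o = si + k,
-- emitted = k, remaining positions gp.drop k), the two finished outputs coincide.
theorem pvMain (gp : List Int) (cs : List Char) :
    ∀ (m si k : Nat) (res : List Char),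
      (cs.length - si) + (gp.length - k) ≤ m → si ≤ cs.length → k ≤ gp.length →
      (pvALoop gp (cs.drop si) si res k).1
        ++ List.replicate (gp.length - (pvALoop gp (cs.drop si) si res k).2) '-'
      = (pvBLoop cs (gp.drop k) res si (si + k) k).1
        ++ cs.drop (pvBLoop cs (gp.drop k) res si (si + k) k).2.1
        ++ List.replicate (gp.length - (pvBLoop cs (gp.drop k) res si (si + k) k).2.2) '-' := by
  intro m
  induction m with
  | zero =>
    intro si k res hm hsi hk
    have h1 : si = cs.length := by omega
    have h2 : k = gp.length := by omega
    subst h1 h2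
    simp [pvALoop, pvBLoop, List.drop_length]
  | succ m ih =>
    intro si k res hm hsi hk
    by_cases hsl : si < cs.length
    · -- there is a current character c
      obtain ⟨c, hc⟩ : ∃ c, cs.drop si = c :: cs.drop (si + 1) :=
        ⟨cs[si], by rw [List.drop_eq_getElem_cons hsl]⟩
      by_cases hfire : k < gp.length ∧ ((si : Int) + (k : Int) = gp.getD k 0)
      · -- A's while fires once; B accepts position gp[k] with need = 0
        have hgpk : gp.drop k = gp.getD k 0 :: gp.drop (k + 1) := by
          rw [List.getD_eq_getElem _ _ hfire.1, List.drop_eq_getElem_cons hfire.1]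
        have hA : pvALoop gp (cs.drop si) si res k
                = pvALoop gp (cs.drop si) si (res ++ ['-']) (k + 1) := by
          rw [hc]; simp only [pvALoop]; rw [pvAGaps_fire gp si res k hfire]
        have hB : pvBLoop cs (gp.drop k) res si (si + k) k
                = pvBLoop cs (gp.drop (k + 1)) (res ++ ['-']) si (si + (k + 1)) (k + 1) := by
          rw [hgpk]; simp only [pvBLoop]
          rw [if_neg (show ¬ (gp.getD k 0 - ((si + k : Nat) : Int) < 0 ∨
              (si : Int) + (gp.getD k 0 - ((si + k : Nat) : Int)) > (cs.length : Int)) by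
            push_cast; omega)]
          have e1 : si + k + (gp.getD k 0 - ((si + k : Nat) : Int)).toNat + 1 = si + (k + 1) := by
            omega
          have ht : (gp.getD k 0 - ((si + k : Nat) : Int)).toNat = 0 := by omega
          rw [e1, ht]
          simp
        rw [hA, hB]
        exact ih si (k + 1) (res ++ ['-']) (by omega) hsi hfire.1
      · -- A's while stops: emit character c
        have hA : pvALoop gp (cs.drop si) si res k
                = pvALoop gp (cs.drop (si + 1)) (si + 1) (res ++ [c]) k := by
          rw [hc]; simp only [pvALoop]; rw [pvAGaps_stop gp si res k hfire]
        by_cases hkn : k < gp.length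
        · have hgpk : gp.drop k = gp.getD k 0 :: gp.drop (k + 1) := by
            rw [List.getD_eq_getElem _ _ hkn, List.drop_eq_getElem_cons hkn]
          by_cases hacc : gp.getD k 0 - ((si + k : Nat) : Int) < 0
              ∨ (si : Int) + (gp.getD k 0 - ((si + k : Nat) : Int)) > (cs.length : Int)
          · -- B breaks now; it also breaks from state (si+1, k)
            have hBnow : pvBLoop cs (gp.drop k) res si (si + k) k = (res, si, k) := by
              rw [hgpk]; simp only [pvBLoop]; rw [if_pos hacc]
            have hBnext : pvBLoop cs (gp.drop k) (res ++ [c]) (si + 1) ((si + 1) + k) k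
                = (res ++ [c], si + 1, k) := by
              rw [hgpk]; simp only [pvBLoop]
              rw [if_pos (show gp.getD k 0 - ((si + 1 + k : Nat) : Int) < 0
                  ∨ ((si + 1 : Nat) : Int) + (gp.getD k 0 - ((si + 1 + k : Nat) : Int)) > (cs.length : Int) by
                push_cast at hacc ⊢; omega)]
            rw [hA]
            have := ih (si + 1) k (res ++ [c]) (by omega) (by omega) hk
            rw [hBnext] at this
            rw [this, hBnow]
            simp [hc]
          · -- B accepts with need ≥ 1: the emitted slice starts with c
            have hne : (si : Int) + (k : Int) ≠ gp.getD k 0 := fun he => hfire ⟨hkn, he⟩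
            have hneed1 : (1 : Int) ≤ gp.getD k 0 - ((si + k : Nat) : Int) := by
              push_cast at hacc ⊢; omega
            have hBstep : pvBLoop cs (gp.drop k) res si (si + k) k
                = pvBLoop cs (gp.drop k) (res ++ [c]) (si + 1) ((si + 1) + k) k := by
              rw [hgpk]; simp only [pvBLoop]
              rw [if_neg hacc, if_neg (show ¬ (gp.getD k 0 - ((si + 1 + k : Nat) : Int) < 0
                  ∨ ((si + 1 : Nat) : Int) + (gp.getD k 0 - ((si + 1 + k : Nat) : Int)) > (cs.length : Int)) by
                push_cast at hacc ⊢; omega)]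
              have hneed' : (gp.getD k 0 - ((si + 1 + k : Nat) : Int)).toNat
                  = (gp.getD k 0 - ((si + k : Nat) : Int)).toNat - 1 := by omega
              have htake : (cs.drop si).take (gp.getD k 0 - ((si + k : Nat) : Int)).toNat
                  = c :: (cs.drop (si + 1)).take ((gp.getD k 0 - ((si + k : Nat) : Int)).toNat - 1) := by
                rw [hc]
                have h2 : (gp.getD k 0 - ((si + k : Nat) : Int)).toNat
                    = ((gp.getD k 0 - ((si + k : Nat) : Int)).toNat - 1) + 1 := by omega
                rw [h2, List.take_succ_cons]
                simp
              rw [htake, hneed']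
              have e1 : si + 1 + ((gp.getD k 0 - ((si + k : Nat) : Int)).toNat - 1)
                  = si + (gp.getD k 0 - ((si + k : Nat) : Int)).toNat := by omega
              have e2 : si + 1 + k + ((gp.getD k 0 - ((si + k : Nat) : Int)).toNat - 1) + 1
                  = si + k + (gp.getD k 0 - ((si + k : Nat) : Int)).toNat + 1 := by omega
              rw [e1, e2]
              simp
            rw [hA, hBstep]
            exact ih (si + 1) k (res ++ [c]) (by omega) (by omega) hk
        · -- k = gp.length: no positions left, B returns immediately from both states
          have hkeq : k = gp.length := by omega
          have hnil : gp.drop k = [] := by simp [hkeq]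
          rw [hA]
          have := ih (si + 1) k (res ++ [c]) (by omega) (by omega) hk
          rw [hnil] at this ⊢
          simp only [pvBLoop] at this ⊢
          rw [this]
          simp [hc]
    · -- si = cs.length: A is done; B can still consume end-of-sequence positions (need = 0)
      have hsl' : si = cs.length := by omega
      have hAdone : pvALoop gp (cs.drop si) si res k = (res, k) := by
        rw [hsl', List.drop_length]; rfl
      by_cases hkn : k < gp.length
      · have hgpk : gp.drop k = gp.getD k 0 :: gp.drop (k + 1) := by
          rw [List.getD_eq_getElem _ _ hkn, List.drop_eq_getElem_cons hkn]
        by_cases hacc : gp.getD k 0 - ((si + k : Nat) : Int) < 0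
            ∨ (si : Int) + (gp.getD k 0 - ((si + k : Nat) : Int)) > (cs.length : Int)
        · -- B breaks
          have hBnow : pvBLoop cs (gp.drop k) res si (si + k) k = (res, si, k) := by
            rw [hgpk]; simp only [pvBLoop]; rw [if_pos hacc]
          rw [hAdone, hBnow]
          simp [hsl', List.drop_length]
        · -- B accepts with need = 0 since si = len: emits '-' only
          have hneed0 : gp.getD k 0 - ((si + k : Nat) : Int) = 0 := by
            push_cast at hacc ⊢; omega
          have hBstep : pvBLoop cs (gp.drop k) res si (si + k) k
              = pvBLoop cs (gp.drop (k + 1)) (res ++ ['-']) si (si + (k + 1)) (k + 1) := by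
            rw [hgpk]; simp only [pvBLoop]
            rw [if_neg hacc]
            have e1 : si + k + (gp.getD k 0 - ((si + k : Nat) : Int)).toNat + 1 = si + (k + 1) := by
              omega
            rw [e1, hneed0]
            simp
          rw [hBstep]
          have := ih si (k + 1) (res ++ ['-']) (by omega) hsi hkn
          have hAdone' : pvALoop gp (cs.drop si) si (res ++ ['-']) (k + 1) = (res ++ ['-'], k + 1) := by
            rw [hsl', List.drop_length]; rfl
          rw [hAdone'] at this
          rw [← this, hAdone]
          simp only
          have hrep : gp.length - k = (gp.length - (k + 1)) + 1 := by omega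
          rw [hrep, List.replicate_succ]
          simp
      · have hkeq : k = gp.length := by omega
        have hnil : gp.drop k = [] := by simp [hkeq]
        rw [hAdone, hnil]
        simp only [pvBLoop]
        simp [hsl', List.drop_length]

-- ===== VERDICT (by name: the statement is the Claim_ definition above) =====
theorem recreate_alignment_spec : Claim_equal_recreate_alignment := by
  intro seq gap_string _ _
  unfold Spec_recreate_alignment recreate_alignment recreate_alignment_alt
  by_cases hgs : gap_string = ""
  · simp [hgs]
  · simp only [hgs, if_false]
    congr 1
    have := pvMain (pvGapPositions gap_string) seq.toList
      (seq.toList.length + (pvGapPositions gap_string).length) 0 0 []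
      (by omega) (by omega) (by omega)
    simpa using this
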